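-- pv_equiv track=rewrite | github.com/koushik-00/CD_Programs | parsers/ll1.py | ll1_parser
-- ===== SOURCE A (Python) =====
-- grammar_rules = {
--     'S': [('a', 'A'), ('b', 'B')],
--     'A': [('c',), ('d',)],
--
--   'B': [('c',), ('e',)],
-- }
--
-- parse_table = {
--     ('S', 'a'): ('a', 'A'),
--     ('S', 'b'): ('b', 'B'),
--     ('A', 'c'): ('c',),
--     ('A', 'd'): ('d',),
--     ('B', 'c'): ('c',),
--     ('B', 'e'): ('e',),
-- }
--
-- def ll1_parser(input_string):
--     stack=['S']
--     idx=0
--     while stack: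
--         top=stack.pop()
--
--         if top in grammar_rules:
--             try:
--                 prod=parse_table[top,input_string[idx]]
--             except KeyError:
--                 return False
--             stack.extend(reversed(prod))
--         elif top==input_string[idx]:
--             idx+=1
--         else:
--             return False
--     return idx==len(input_string)
-- ===== SOURCE B (Python) =====
-- # Recursive-descent parser for the same LL(1) grammar: S -> aA | bB, A -> c|d, B -> c|e.
-- # Each nonterminal gets a parse function that reads the lookahead unguarded and returns
-- # the index after its derivation, or None on mismatch; accept iff S's parse consumes all input.
-- def _parse_A(s, i):
--     return i + 1 if s[i] in ('c', 'd') else None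
--
-- def _parse_B(s, i):
--     return i + 1 if s[i] in ('c', 'e') else None
--
-- def _parse_S(s, i):
--     c = s[i]
--     if c == 'a':
--         return _parse_A(s, i + 1)
--     if c == 'b':
--         return _parse_B(s, i + 1)
--     return None
--
-- def ll1_parser(input_string):
--     end = _parse_S(input_string, 0)
--     return end is not None and end == len(input_string)
-- ===== Notes on version B (the rewrite author's own statement) =====
-- stated objective: idiomatic
-- what changed: Replaced the table-driven LL(1) stack machine (explicit stack, parse_table lookups, a while loop) by a recursive-descent parser with one parse function per nonterminal that returns the index after its derivation.
-- outside the precondition, e.g. on ll1_parser(''): A raises IndexError, B raises IndexError; on ll1_parser('a'): A raises IndexError, B raises IndexError; on ll1_parser('b'): A raises IndexError, B raises IndexError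
import Mathlib
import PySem

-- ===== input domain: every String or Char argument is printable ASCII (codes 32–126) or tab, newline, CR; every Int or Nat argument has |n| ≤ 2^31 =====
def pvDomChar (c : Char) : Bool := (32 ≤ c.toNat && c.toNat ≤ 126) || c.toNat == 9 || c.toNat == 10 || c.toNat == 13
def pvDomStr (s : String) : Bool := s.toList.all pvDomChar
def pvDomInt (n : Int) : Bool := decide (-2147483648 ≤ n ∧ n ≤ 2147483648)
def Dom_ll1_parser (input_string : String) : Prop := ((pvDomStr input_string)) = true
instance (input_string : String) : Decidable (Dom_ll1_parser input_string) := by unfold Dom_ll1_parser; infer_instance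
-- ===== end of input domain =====

-- B replaces the table-driven LL(1) stack machine by an equivalent recursive-descent parser (idiomatic rewrite).

-- B replaces the table-driven LL(1) stack machine (explicit stack + parse_table + while loop)
-- by an equivalent recursive-descent parser with one function per nonterminal (idiomatic rewrite).

-- ===== PORT A =====
-- parse_table as a function: some prod on the six defined keys, none = KeyError (-> return False)
def pvTable (top : Char) (c : Char) : Option (List Char) :=
  if top = 'S' ∧ c = 'a' then some ['a', 'A']
  else if top = 'S' ∧ c = 'b' then some ['b', 'B']
  else if top = 'A' ∧ c = 'c' then some ['c']
  else if top = 'A' ∧ c = 'd' then some ['d']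
  else if top = 'B' ∧ c = 'c' then some ['c']
  else if top = 'B' ∧ c = 'e' then some ['e']
  else none
def pvWeight (c : Char) : Nat := if c = 'S' then 4 else if c = 'A' ∨ c = 'B' then 2 else 1
theorem pvTable_weight (top c : Char) (prod : List Char)
    (h : pvTable top c = some prod) :
    (prod.map pvWeight).sum < pvWeight top := by
  unfold pvTable at h
  split_ifs at h <;> simp_all [pvWeight] <;> (subst h; decide)
def pvLoop (cs : List Char) (stack : List Char) (idx : Nat) : Bool :=
  match stack with
  | [] => idx == cs.length
  | top :: rest =>
    if top = 'S' ∨ top = 'A' ∨ top = 'B' then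
      match PySem.List.pyGet? cs ((idx : Nat) : Int) with
      | none => false
      | some c =>
        match hp : pvTable top c with
        | none => false
        | some prod => pvLoop cs (prod ++ rest) idx
    else
      match PySem.List.pyGet? cs ((idx : Nat) : Int) with
      | none => false
      | some c => if top = c then pvLoop cs rest (idx + 1) else false
termination_by (stack.map pvWeight).sum
decreasing_by
  · simp only [List.map_append, List.sum_append, List.map_cons, List.sum_cons]
    have := pvTable_weight top c prod hp
    omega
  · have hw : 0 < pvWeight top := by unfold pvWeight; split_ifs <;> omega
    simp only [List.map_cons, List.sum_cons]
    omega

def ll1_parser (input_string : String) : Bool :=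
  pvLoop input_string.toList ['S'] 0

-- ===== PORT B =====
-- one parse function per nonterminal: returns the index after its derivation, none on
-- mismatch (and on out-of-range lookahead, which Pre_ excludes)
def pvParseA (s : List Char) (i : Nat) : Option Nat :=
  match PySem.List.pyGet? s ((i : Nat) : Int) with
  | none => none
  | some c => if c = 'c' ∨ c = 'd' then some (i + 1) else none
def pvParseB (s : List Char) (i : Nat) : Option Nat :=
  match PySem.List.pyGet? s ((i : Nat) : Int) with
  | none => none
  | some c => if c = 'c' ∨ c = 'e' then some (i + 1) else none
def pvParseS (s : List Char) (i : Nat) : Option Nat :=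
  match PySem.List.pyGet? s ((i : Nat) : Int) with
  | none => none
  | some c =>
    if c = 'a' then pvParseA s (i + 1)
    else if c = 'b' then pvParseB s (i + 1)
    else none


def ll1_parser_alt (input_string : String) : Bool :=
  match pvParseS input_string.toList 0 with
  | none => false
  | some e => e == input_string.toList.length

-- ===== PRECONDITION & SPEC =====
-- Pre_ excludes exactly the inputs "", "a" and "b", on which A (and B alike) raises
-- IndexError by reading a lookahead past the end of the input.
def Pre_ll1_parser (input_string : String) : Prop :=
  input_string.toList ≠ [] ∧ input_string.toList ≠ ['a'] ∧ input_string.toList ≠ ['b']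
instance (input_string : String) : Decidable (Pre_ll1_parser input_string) := by
  unfold Pre_ll1_parser; infer_instance
def pvWitness_ll1_parser : String := "ac"

def Spec_ll1_parser (input_string : String) (out : Bool) : Prop := out = ll1_parser_alt input_string
instance (input_string : String) (out : Bool) : Decidable (Spec_ll1_parser input_string out) := by
  unfold Spec_ll1_parser; infer_instance

-- ===== CLAIM (what is proved, stated in full; the proofs are below) =====
def Claim_equal_ll1_parser : Prop := ∀ (input_string : String), Dom_ll1_parser input_string → Pre_ll1_parser input_string → Spec_ll1_parser input_string (ll1_parser input_string)

-- ===== LEMMAS AND PROOFS =====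

theorem pvLoop_nil (cs : List Char) (idx : Nat) : pvLoop cs [] idx = (idx == cs.length) := by
  rw [pvLoop]

theorem pvLoop_nt (cs rest : List Char) (idx : Nat) (top c : Char)
    (hnt : top = 'S' ∨ top = 'A' ∨ top = 'B')
    (hg : PySem.List.pyGet? cs ((idx : Nat) : Int) = some c) :
    pvLoop cs (top :: rest) idx =
      (match pvTable top c with
       | none => false
       | some prod => pvLoop cs (prod ++ rest) idx) := by
  rw [pvLoop, if_pos hnt, hg]
  split
  · rename_i hp; simp at hp
  · rename_i prod hp
    obtain rfl : c = prod := by injection hp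
    split
    · rename_i h; rw [h]
    · rename_i prod2 h; rw [h]

theorem pvLoop_t (cs rest : List Char) (idx : Nat) (top c : Char)
    (hnt : ¬(top = 'S' ∨ top = 'A' ∨ top = 'B'))
    (hg : PySem.List.pyGet? cs ((idx : Nat) : Int) = some c) :
    pvLoop cs (top :: rest) idx = if top = c then pvLoop cs rest (idx + 1) else false := by
  rw [pvLoop, if_neg hnt, hg]

theorem pv_main (cs : List Char) (h0 : cs ≠ []) (h1 : cs ≠ ['a']) (h2 : cs ≠ ['b']) :
    pvLoop cs ['S'] 0 = (match pvParseS cs 0 with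
      | none => false
      | some e => e == cs.length) := by
  match cs, h0 with
  | [c], _ =>
    have ha : c ≠ 'a' := by intro h; exact h1 (by simp [h])
    have hb : c ≠ 'b' := by intro h; exact h2 (by simp [h])
    have ht : pvTable 'S' c = none := by simp [pvTable, ha, hb]
    have hg : PySem.List.pyGet? [c] ((0 : Nat) : Int) = some c := by simp [pysem]
    rw [pvLoop_nt [c] [] 0 'S' c (by decide) hg, ht]
    simp [pvParseS, ha, hb]
  | c1 :: c2 :: rest, _ =>
    have hg0 : PySem.List.pyGet? (c1 :: c2 :: rest) ((0 : Nat) : Int) = some c1 := by simp [pysem]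
    have hg1 : PySem.List.pyGet? (c1 :: c2 :: rest) ((1 : Nat) : Int) = some c2 := by simp [pysem]
    rw [pvLoop_nt _ _ 0 'S' c1 (by decide) hg0]
    by_cases ha : c1 = 'a'
    · subst ha
      rw [show pvTable 'S' 'a' = some ['a', 'A'] from rfl]
      simp only [List.append_nil]
      rw [pvLoop_t _ _ 0 'a' 'a' (by decide) hg0, if_pos rfl]
      rw [pvLoop_nt _ _ 1 'A' c2 (by decide) hg1]
      by_cases hc : c2 = 'c' ∨ c2 = 'd'
      · have htA : pvTable 'A' c2 = some [c2] := by
          rcases hc with h | h <;> subst h <;> rfl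
        rw [htA]
        simp only [List.append_nil]
        rw [pvLoop_t _ _ 1 c2 c2 (by rcases hc with h | h <;> subst h <;> decide) hg1, if_pos rfl]
        rw [pvLoop_nil]
        simp [pvParseS, pvParseA, hc]
      · have htA : pvTable 'A' c2 = none := by
          simp only [not_or] at hc
          simp [pvTable, hc.1, hc.2]
        rw [htA]
        simp [pvParseS, pvParseA, hc]
    · by_cases hb : c1 = 'b'
      · subst hb
        rw [show pvTable 'S' 'b' = some ['b', 'B'] from rfl]
        simp only [List.append_nil]
        rw [pvLoop_t _ _ 0 'b' 'b' (by decide) hg0, if_pos rfl]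
        rw [pvLoop_nt _ _ 1 'B' c2 (by decide) hg1]
        by_cases hc : c2 = 'c' ∨ c2 = 'e'
        · have htB : pvTable 'B' c2 = some [c2] := by
            rcases hc with h | h <;> subst h <;> rfl
          rw [htB]
          simp only [List.append_nil]
          rw [pvLoop_t _ _ 1 c2 c2 (by rcases hc with h | h <;> subst h <;> decide) hg1, if_pos rfl]
          rw [pvLoop_nil]
          simp [pvParseS, pvParseB, hc]
        · have htB : pvTable 'B' c2 = none := by
            simp only [not_or] at hc
            simp [pvTable, hc.1, hc.2]
          rw [htB]
          simp [pvParseS, pvParseB, hc]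
      · have ht : pvTable 'S' c1 = none := by simp [pvTable, ha, hb]
        rw [ht]
        simp [pvParseS, ha, hb]

-- ===== VERDICT (by name: the statement is the Claim_ definition above) =====
theorem ll1_parser_spec : Claim_equal_ll1_parser := by
  intro s _ hpre
  unfold Spec_ll1_parser ll1_parser ll1_parser_alt
  exact pv_main s.toList hpre.1 hpre.2.1 hpre.2.2
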